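-- pv_equiv track=rewrite | github.com/haohao0103/tugraph-analytics | geaflow-ai/plugins/casts/core/gremlin_state.py | _split_steps
-- ===== SOURCE A (Python) =====
-- def _split_steps(signature: str) -> list[str]:
--     """Split a traversal signature into raw step segments."""
--     if not signature:
--         return []
--
--     steps: list[str] = []
--     current: list[str] = []
--     depth = 0
--
--     for ch in signature:
--         if ch == "." and depth == 0:
--             if current:
--                 steps.append("".join(current))
--                 current = []
--             continue
--
--         if ch == "(":
--             depth += 1
--         elif ch == ")":
--             depth = max(depth - 1, 0)
--
--         current.append(ch)
--
--     if current:
--         steps.append("".join(current))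
--
--     return [step for step in steps if step]
-- ===== SOURCE B (Python) =====
-- def _split_steps(signature: str) -> list[str]:
--     """Split a traversal signature into raw step segments (cut-index + slicing strategy)."""
--     cuts = [-1]
--     depth = 0
--     for i, ch in enumerate(signature):
--         if ch == "(":
--             depth += 1
--         elif ch == ")":
--             depth = max(depth - 1, 0)
--         elif ch == "." and depth == 0:
--             cuts.append(i)
--     cuts.append(len(signature))
--     return [seg for a, b in zip(cuts, cuts[1:]) if (seg := signature[a + 1:b])]
-- ===== Notes on version B (the rewrite author's own statement) =====
-- stated objective: alternative
-- what changed: B replaces A's character-accumulator (building each segment char by char in a 'current' buffer) by a cut-index strategy: one scan records the indices of top-level dots, then the result is produced by slicing the original string between consecutive cut indices and dropping empty slices.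
import Mathlib
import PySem

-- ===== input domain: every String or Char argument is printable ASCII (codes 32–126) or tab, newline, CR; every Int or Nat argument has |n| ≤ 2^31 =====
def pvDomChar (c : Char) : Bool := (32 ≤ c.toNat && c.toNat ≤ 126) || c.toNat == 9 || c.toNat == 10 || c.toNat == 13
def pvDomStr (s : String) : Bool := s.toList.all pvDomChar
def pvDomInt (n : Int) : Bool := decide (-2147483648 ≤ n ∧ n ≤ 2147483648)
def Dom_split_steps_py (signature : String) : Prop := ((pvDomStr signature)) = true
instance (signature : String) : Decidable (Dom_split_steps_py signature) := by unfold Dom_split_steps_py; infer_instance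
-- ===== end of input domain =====

-- B splits by recording top-level dot indices and slicing between them, instead of A's
-- character-accumulator buffer; same O(n) cost, genuinely different decomposition ("alternative").

-- ===== PORT A =====
-- loop body of A's for-loop, as a named fold step (state: steps, current, depth)
def pvStepA (st : List String × List Char × Int) (ch : Char) : List String × List Char × Int :=
  if ch = '.' ∧ st.2.2 = 0 then
    if st.2.1 ≠ [] then (st.1 ++ [String.ofList st.2.1], [], st.2.2) else st
  else
    let d := if ch = '(' then st.2.2 + 1 else if ch = ')' then max (st.2.2 - 1) 0 else st.2.2
    (st.1, st.2.1 ++ [ch], d)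

def split_steps_py (signature : String) : List String :=
  if signature = "" then []
  else
    let st := signature.toList.foldl pvStepA ([], [], 0)
    -- ''.join(current) is ported exactly as String.ofList of the accumulated char list
    let steps := if st.2.1 ≠ [] then st.1 ++ [String.ofList st.2.1] else st.1
    steps.filter (fun s => decide (s ≠ ""))

-- ===== PORT B =====
-- loop body of B's for-loop over enumerate(signature) (state: cuts, depth)
def pvStepB (st : List Int × Int) (p : Int × Char) : List Int × Int :=
  if p.2 = '(' then (st.1, st.2 + 1)
  else if p.2 = ')' then (st.1, max (st.2 - 1) 0)
  else if p.2 = '.' ∧ st.2 = 0 then (st.1 ++ [p.1], st.2)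
  else st

def split_steps_py_alt (signature : String) : List String :=
  let st := (PySem.List.enumerate signature.toList).foldl pvStepB ([-1], 0)
  let cuts := st.1 ++ [(signature.toList.length : Int)]
  (cuts.zip cuts.tail).filterMap (fun ab =>
    let seg := PySem.Str.slice signature (some (ab.1 + 1)) (some ab.2)
    if seg ≠ "" then some seg else none)

-- ===== PRECONDITION & SPEC =====
def Spec_split_steps_py (signature : String) (out : List String) : Prop := out = split_steps_py_alt signature
instance (signature : String) (out : List String) : Decidable (Spec_split_steps_py signature out) := by unfold Spec_split_steps_py; infer_instance

-- ===== CLAIM (what is proved, stated in full; the proofs are below) =====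
def Claim_equal_split_steps_py : Prop := ∀ (signature : String), Dom_split_steps_py signature → Spec_split_steps_py signature (split_steps_py signature)

-- ===== LEMMAS AND PROOFS =====

-- depth update performed by both programs on a non-top-level-dot character
def pvUpd (d : Int) (c : Char) : Int :=
  if c = '(' then d + 1 else if c = ')' then max (d - 1) 0 else d

-- prepend a prefix onto the head segment
def pvHcons (p : List Char) : List (List Char) → List (List Char)
  | [] => [p]
  | s :: ss => (p ++ s) :: ss

-- reference semantics: the raw (possibly empty) segments of a suffix, given the entry depth
def pvSegs : Int → List Char → List (List Char)
  | _, [] => [[]]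
  | d, c :: r => if c = '.' ∧ d = 0 then [] :: pvSegs d r else pvHcons [c] (pvSegs (pvUpd d c) r)

-- absolute positions (counted from j) of the top-level dots of a suffix
def pvDotsZ : Nat → Int → List Char → List Int
  | _, _, [] => []
  | j, d, c :: r =>
    if c = '.' ∧ d = 0 then ((j : Nat) : Int) :: pvDotsZ (j + 1) d r else pvDotsZ (j + 1) (pvUpd d c) r

-- keep the nonempty segments, as strings
def pvFilt (ss : List (List Char)) : List String :=
  ss.filterMap (fun c => if c = [] then none else some (String.ofList c))

-- the slices of l between consecutive cut positions (each slice excludes the left cut index)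
def pvPairSlices (l : List Char) (cuts : List Int) : List (List Char) :=
  (cuts.zip cuts.tail).map (fun ab => PySem.List.slice l (some (ab.1 + 1)) (some ab.2))

-- A's post-loop flush of the pending segment
def pvFinish (st : List String × List Char × Int) : List String :=
  if st.2.1 ≠ [] then st.1 ++ [String.ofList st.2.1] else st.1

lemma pvHcons_hcons (p q : List Char) (ss : List (List Char)) :
    pvHcons p (pvHcons q ss) = pvHcons (p ++ q) ss := by
  cases ss <;> simp [pvHcons]

lemma pvSegs_shape (d : Int) (r : List Char) : ∃ s ss, pvSegs d r = s :: ss := by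
  cases r with
  | nil => exact ⟨[], [], rfl⟩
  | cons c r =>
    simp only [pvSegs]
    split
    · exact ⟨[], pvSegs d r, rfl⟩
    · cases h : pvSegs (pvUpd d c) r with
      | nil => exact ⟨[c], [], by simp [pvHcons]⟩
      | cons s ss => exact ⟨[c] ++ s, ss, by simp [pvHcons]⟩

lemma pvFilt_hcons_nil (d : Int) (r : List Char) :
    pvFilt (pvHcons [] (pvSegs d r)) = pvFilt (pvSegs d r) := by
  obtain ⟨s, ss, h⟩ := pvSegs_shape d r
  simp [h, pvHcons]

lemma pvA_inv (r : List Char) : ∀ (steps : List String) (cur : List Char) (d : Int),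
    pvFinish (r.foldl pvStepA (steps, cur, d)) = steps ++ pvFilt (pvHcons cur (pvSegs d r)) := by
  induction r with
  | nil =>
    intro steps cur d
    by_cases hc : cur = [] <;> simp [hc, pvFinish, pvSegs, pvHcons, pvFilt]
  | cons c r ih =>
    intro steps cur d
    rw [List.foldl_cons]
    by_cases h1 : c = '.' ∧ d = 0
    · by_cases hc : cur = []
      · have hstep : pvStepA (steps, cur, d) c = (steps, cur, d) := by
          simp [pvStepA, h1, hc]
        rw [hstep, ih steps cur d, hc, pvFilt_hcons_nil]
        have : pvSegs d (c :: r) = [] :: pvSegs d r := by simp [pvSegs, h1]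
        rw [this]
        obtain ⟨s, ss, hsh⟩ := pvSegs_shape d r
        simp [hsh, pvHcons, pvFilt]
      · have hstep : pvStepA (steps, cur, d) c = (steps ++ [String.ofList cur], [], d) := by
          simp [pvStepA, h1, hc]
        rw [hstep, ih (steps ++ [String.ofList cur]) [] d, pvFilt_hcons_nil]
        have : pvSegs d (c :: r) = [] :: pvSegs d r := by simp [pvSegs, h1]
        rw [this]
        simp [pvHcons, pvFilt, hc]
    · have hstep : pvStepA (steps, cur, d) c = (steps, cur ++ [c], pvUpd d c) := by
        simp [pvStepA, h1, pvUpd]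
      rw [hstep, ih steps (cur ++ [c]) (pvUpd d c)]
      have : pvSegs d (c :: r) = pvHcons [c] (pvSegs (pvUpd d c) r) := by simp [pvSegs, h1]
      rw [this, pvHcons_hcons]

lemma pvFilt_filter (ss : List (List Char)) :
    (pvFilt ss).filter (fun s => decide (s ≠ "")) = pvFilt ss := by
  induction ss with
  | nil => simp [pvFilt]
  | cons c ss ih =>
    by_cases hc : c = []
    · simpa [pvFilt, hc] using ih
    · have hne : String.ofList c ≠ "" := by
        intro h; apply hc; simpa using congrArg String.toList h
      simpa [pvFilt, hc, hne] using ih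

lemma pvA_eq (s : String) : split_steps_py s = pvFilt (pvSegs 0 s.toList) := by
  by_cases hs : s = ""
  · subst hs; simp [split_steps_py, pvSegs, pvFilt]
  · simp only [split_steps_py, hs, if_neg, not_false_eq_true]
    show (pvFinish (s.toList.foldl pvStepA ([], [], 0))).filter (fun s => decide (s ≠ ""))
        = pvFilt (pvSegs 0 s.toList)
    rw [pvA_inv s.toList [] [] 0]
    simp only [List.nil_append]
    rw [pvFilt_hcons_nil, pvFilt_filter]

lemma pvB_fold (r : List Char) : ∀ (j : Nat) (d : Int) (cuts : List Int),
    ((PySem.List.enumerate r (j : Int)).foldl pvStepB (cuts, d)).1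
    = cuts ++ pvDotsZ j d r := by
  induction r with
  | nil => intro j d cuts; simp [PySem.List.enumerate_nil, pvDotsZ]
  | cons c r ih =>
    intro j d cuts
    rw [PySem.List.enumerate_cons]
    have hcast : (j : Int) + 1 = ((j + 1 : Nat) : Int) := by push_cast; ring
    by_cases h1 : c = '('
    · have hd : ¬ (c = '.' ∧ d = 0) := by rintro ⟨h, _⟩; rw [h] at h1; exact absurd h1 (by decide)
      simp only [List.foldl_cons, pvStepB, h1, if_pos, hcast]
      rw [ih]
      simp [pvDotsZ, pvUpd]
    · by_cases h2 : c = ')'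
      · have hd : ¬ (c = '.' ∧ d = 0) := by rintro ⟨h, _⟩; rw [h] at h2; exact absurd h2 (by decide)
        simp only [List.foldl_cons, pvStepB, h2, hcast]
        rw [ih]
        simp [pvDotsZ, pvUpd]
      · by_cases h3 : c = '.' ∧ d = 0
        · simp only [List.foldl_cons, pvStepB, h3, hcast]
          rw [ih]
          simp [pvDotsZ, List.append_assoc]
        · simp only [List.foldl_cons, pvStepB, h1, h2, h3, if_neg, not_false_eq_true, hcast]
          rw [ih]
          simp [pvDotsZ, h3, pvUpd, h1, h2]

lemma pvDotsZ_mem (r : List Char) : ∀ (j : Nat) (d : Int) (x : Int), x ∈ pvDotsZ j d r →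
    ∃ m : Nat, x = (m : Int) ∧ j ≤ m := by
  induction r with
  | nil => intro j d x h; simp [pvDotsZ] at h
  | cons c r ih =>
    intro j d x h
    simp only [pvDotsZ] at h
    split at h
    · rcases List.mem_cons.1 h with h | h
      · exact ⟨j, h, le_refl j⟩
      · obtain ⟨m, hx, hm⟩ := ih (j + 1) _ x h
        exact ⟨m, hx, by omega⟩
    · obtain ⟨m, hx, hm⟩ := ih (j + 1) _ x h
      exact ⟨m, hx, by omega⟩

lemma pvSlice_cons (l : List Char) (j m : Nat) (c : Char) (r' : List Char)
    (hd : l.drop j = c :: r') (hm : j < m) :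
    PySem.List.slice l (some (j : Int)) (some (m : Int))
    = c :: PySem.List.slice l (some ((j : Int) + 1)) (some (m : Int)) := by
  have h1 : ((j : Int) + 1) = ((j + 1 : Nat) : Int) := by push_cast; ring
  rw [h1, PySem.List.slice_natCast, PySem.List.slice_natCast]
  have hd2 : l.drop (j + 1) = r' := by rw [← List.tail_drop, hd]; rfl
  rw [hd, hd2]
  have h2 : m - j = (m - (j + 1)) + 1 := by omega
  rw [h2, List.take_succ_cons]

lemma pvPairSlices_cons (l : List Char) (x y : Int) (t : List Int) :
    pvPairSlices l (x :: y :: t)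
    = PySem.List.slice l (some (x + 1)) (some y) :: pvPairSlices l (y :: t) := by
  simp [pvPairSlices]

lemma pvMain (r : List Char) : ∀ (j : Nat) (d : Int) (l : List Char),
    l.drop j = r → j + r.length = l.length →
    pvPairSlices l (((j : Int) - 1) :: (pvDotsZ j d r ++ [(l.length : Int)])) = pvSegs d r := by
  induction r with
  | nil =>
    intro j d l _ hlen
    have hn : (l.length : Int) = (j : Int) := by simp at hlen; omega
    simp only [pvDotsZ, List.nil_append, hn]
    show pvPairSlices l [(j : Int) - 1, (j : Int)] = pvSegs d []
    have : pvPairSlices l [(j : Int) - 1, (j : Int)]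
        = [PySem.List.slice l (some ((j : Int) - 1 + 1)) (some (j : Int))] := by
      simp [pvPairSlices]
    rw [this, show ((j : Int) - 1 + 1) = ((j : Nat) : Int) by ring, PySem.List.slice_natCast]
    simp [pvSegs]
  | cons c r' ih =>
    intro j d l hdrop hlen
    have hjlt : j < l.length := by simp at hlen; omega
    have hdrop' : l.drop (j + 1) = r' := by rw [← List.tail_drop, hdrop]; rfl
    have hlen' : (j + 1) + r'.length = l.length := by simp at hlen ⊢; omega
    have hcast : ((j + 1 : Nat) : Int) - 1 = (j : Int) := by push_cast; ring
    by_cases h1 : c = '.' ∧ d = 0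
    · have hdots : pvDotsZ j d (c :: r') = ((j : Nat) : Int) :: pvDotsZ (j + 1) d r' := by
        simp [pvDotsZ, h1]
      rw [hdots]
      have ihj := ih (j + 1) d l hdrop' hlen'
      rw [hcast] at ihj
      simp only [List.cons_append]
      rw [pvPairSlices_cons, ihj]
      rw [show ((j : Int) - 1 + 1) = ((j : Nat) : Int) by ring, PySem.List.slice_natCast]
      simp [pvSegs, h1]
    · have hdots : pvDotsZ j d (c :: r') = pvDotsZ (j + 1) (pvUpd d c) r' := by
        simp [pvDotsZ, h1]
      rw [hdots]
      have ihj := ih (j + 1) (pvUpd d c) l hdrop' hlen'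
      rw [hcast] at ihj
      obtain ⟨s, ss, hshape⟩ := pvSegs_shape (pvUpd d c) r'
      rw [hshape] at ihj
      obtain ⟨m, t, hy, hm⟩ :
          ∃ (m : Nat) (t : List Int),
            pvDotsZ (j + 1) (pvUpd d c) r' ++ [(l.length : Int)] = ((m : Int)) :: t ∧ j < m := by
        cases hds : pvDotsZ (j + 1) (pvUpd d c) r' with
        | nil => exact ⟨l.length, [], by simp, hjlt⟩
        | cons x xs =>
          obtain ⟨m, hx, hmm⟩ := pvDotsZ_mem r' (j + 1) (pvUpd d c) x
            (by rw [hds]; exact List.mem_cons_self ..)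
          exact ⟨m, xs ++ [(l.length : Int)], by simp [hx], by omega⟩
      rw [hy] at ihj ⊢
      rw [pvPairSlices_cons] at ihj ⊢
      obtain ⟨hhead, htail⟩ := List.cons_eq_cons.mp ihj
      rw [show ((j : Int) - 1 + 1) = ((j : Nat) : Int) by ring]
      rw [pvSlice_cons l j m c r' hdrop hm, hhead, htail]
      simp [pvSegs, h1, hshape, pvHcons]

lemma pvFilterMap_slices (s : String) (ps : List (Int × Int)) :
    ps.filterMap (fun ab =>
      let seg := PySem.Str.slice s (some (ab.1 + 1)) (some ab.2)
      if seg ≠ "" then some seg else none)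
    = pvFilt (ps.map (fun ab => PySem.List.slice s.toList (some (ab.1 + 1)) (some ab.2))) := by
  induction ps with
  | nil => simp [pvFilt]
  | cons ab ps ih =>
    have hslice : PySem.Str.slice s (some (ab.1 + 1)) (some ab.2)
        = String.ofList (PySem.List.slice s.toList (some (ab.1 + 1)) (some ab.2)) := by
      simp [PySem.Str.slice, PySem.Chars.slice_eq_listSlice]
    by_cases hL : PySem.List.slice s.toList (some (ab.1 + 1)) (some ab.2) = []
    · have h0 : PySem.Str.slice s (some (ab.1 + 1)) (some ab.2) = "" := by rw [hslice, hL]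
      simpa [pvFilt, h0, hL] using ih
    · have hne : String.ofList (PySem.List.slice s.toList (some (ab.1 + 1)) (some ab.2)) ≠ "" := by
        intro h; apply hL; simpa using congrArg String.toList h
      simpa [pvFilt, hslice, hne, hL] using ih

lemma pvB_eq (s : String) : split_steps_py_alt s = pvFilt (pvSegs 0 s.toList) := by
  simp only [split_steps_py_alt]
  have hfold := pvB_fold s.toList 0 0 [-1]
  rw [show ((0 : Nat) : Int) = 0 from rfl] at hfold
  rw [hfold, pvFilterMap_slices]
  have hmain := pvMain s.toList 0 0 s.toList (by simp) (by simp)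
  rw [show (((0 : Nat) : Int) - 1) = (-1 : Int) by norm_num] at hmain
  simp only [pvPairSlices] at hmain
  rw [show (([-1] ++ pvDotsZ 0 0 s.toList) ++ [(s.toList.length : Int)])
      = ((-1 : Int) :: (pvDotsZ 0 0 s.toList ++ [(s.toList.length : Int)])) by simp]
  rw [hmain]

-- ===== VERDICT (by name: the statement is the Claim_ definition above) =====
theorem split_steps_py_spec : Claim_equal_split_steps_py := by
  intro s _
  show split_steps_py s = split_steps_py_alt s
  rw [pvA_eq, pvB_eq]
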